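-- pv_equiv track=rewrite | github.com/Aizak5/AOIS | lab3/lab3.py | combine_terms
-- ===== SOURCE A (Python) =====
-- def combine_terms(t1, t2):
--     diff = 0
--     res = []
--     for a, b in zip(t1, t2):
--         if a == b:
--             res.append(a)
--         else:
--             res.append('-')
--             diff += 1
--     return "".join(res) if diff == 1 else None
-- ===== SOURCE B (Python) =====
-- def combine_terms(t1, t2):
--     pairs = list(zip(t1, t2))
--     idx = [i for i, (a, b) in enumerate(pairs) if a != b]
--     if len(idx) != 1:
--         return None
--     j = idx[0]
--     return "".join(a for a, _ in pairs[:j]) + "-" + "".join(a for a, _ in pairs[j+1:])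
-- ===== Notes on version B (the rewrite author's own statement) =====
-- stated objective: alternative
-- what changed: B first collects the list of mismatching indices from enumerate(zip(t1,t2)), tests that there is exactly one, and then rebuilds the result by slicing around that index, instead of A's single loop that accumulates a diff counter and the output characters together.
import Mathlib
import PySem

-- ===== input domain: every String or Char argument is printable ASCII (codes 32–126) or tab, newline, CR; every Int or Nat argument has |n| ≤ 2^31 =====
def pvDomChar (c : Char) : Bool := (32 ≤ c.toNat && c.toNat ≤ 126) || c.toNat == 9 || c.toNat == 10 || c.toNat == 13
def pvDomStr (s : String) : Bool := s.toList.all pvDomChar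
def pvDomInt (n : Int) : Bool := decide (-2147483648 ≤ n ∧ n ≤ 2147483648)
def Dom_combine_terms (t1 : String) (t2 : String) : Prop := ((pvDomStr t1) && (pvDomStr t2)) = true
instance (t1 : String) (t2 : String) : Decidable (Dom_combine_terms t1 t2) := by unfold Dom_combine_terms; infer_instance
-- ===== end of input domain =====

-- B separates the test (collect the mismatch indices, require exactly one) from the
-- construction (slice around that index), instead of A's single accumulating loop.

-- ===== PORT A =====
def combine_terms (t1 : String) (t2 : String) : Option String :=
  let st := (t1.toList.zip t2.toList).foldl
    (fun (st : Nat × List Char) ab =>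
      if ab.1 == ab.2 then (st.1, st.2 ++ [ab.1])
      else (st.1 + 1, st.2 ++ ['-'])) (0, [])
  if st.1 == 1 then some (String.mk st.2) else none

-- ===== PORT B =====
def combine_terms_alt (t1 : String) (t2 : String) : Option String :=
  let pairs := t1.toList.zip t2.toList
  let idx := ((PySem.List.enumerate pairs 0).filter (fun p => p.2.1 ≠ p.2.2)).map (·.1)
  match idx with
  | [j] =>
      some (String.mk ((PySem.List.slice pairs none (some j)).map Prod.fst
            ++ '-' :: (PySem.List.slice pairs (some (j + 1)) none).map Prod.fst))
  | _ => none

-- ===== PRECONDITION & SPEC =====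
def Spec_combine_terms (t1 : String) (t2 : String) (out : Option String) : Prop := out = combine_terms_alt t1 t2
instance (t1 : String) (t2 : String) (out : Option String) : Decidable (Spec_combine_terms t1 t2 out) := by unfold Spec_combine_terms; infer_instance

-- ===== CLAIM (what is proved, stated in full; the proofs are below) =====
def Claim_equal_combine_terms : Prop := ∀ (t1 : String) (t2 : String), Dom_combine_terms t1 t2 → Spec_combine_terms t1 t2 (combine_terms t1 t2)

-- ===== LEMMAS AND PROOFS =====

/-- Mismatch count of a zipped list. -/
def pvMism (z : List (Char × Char)) : Nat := z.countP (fun p => p.1 ≠ p.2)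

/-- What A's loop appends. -/
def pvMapf (z : List (Char × Char)) : List Char :=
  z.map (fun p => if p.1 = p.2 then p.1 else '-')

/-- B's mismatch-index list, start index generalized. -/
def pvIdx (s : Int) (z : List (Char × Char)) : List Int :=
  ((PySem.List.enumerate z s).filter (fun p => p.2.1 ≠ p.2.2)).map (·.1)

lemma pvMism_cons (p : Char × Char) (z : List (Char × Char)) :
    pvMism (p :: z) = (if p.1 = p.2 then 0 else 1) + pvMism z := by
  by_cases h : p.1 = p.2 <;> simp [pvMism, List.countP_cons, h] <;> omega

lemma pvMapf_cons (p : Char × Char) (z : List (Char × Char)) :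
    pvMapf (p :: z) = (if p.1 = p.2 then p.1 else '-') :: pvMapf z := rfl

lemma pvIdx_nil (s : Int) : pvIdx s [] = [] := by simp [pvIdx, PySem.List.enumerate_nil]

lemma pvIdx_cons (s : Int) (p : Char × Char) (z : List (Char × Char)) :
    pvIdx s (p :: z) = if p.1 ≠ p.2 then s :: pvIdx (s + 1) z else pvIdx (s + 1) z := by
  by_cases h : p.1 = p.2 <;> simp [pvIdx, PySem.List.enumerate_cons, h]

lemma foldA (z : List (Char × Char)) : ∀ (d : Nat) (acc : List Char),
    z.foldl (fun (st : Nat × List Char) ab =>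
      if ab.1 == ab.2 then (st.1, st.2 ++ [ab.1])
      else (st.1 + 1, st.2 ++ ['-'])) (d, acc) = (d + pvMism z, acc ++ pvMapf z) := by
  induction z with
  | nil => intro d acc; simp [pvMism, pvMapf]
  | cons p z ih =>
    intro d acc
    rw [List.foldl_cons, pvMism_cons, pvMapf_cons]
    by_cases h : p.1 = p.2
    · simp only [h, beq_self_eq_true, if_true, ih]
      refine Prod.ext (by simp) (by simp)
    · have hb : (p.1 == p.2) = false := by simpa using h
      simp only [hb, Bool.false_eq_true, if_false, if_neg h, ih]
      refine Prod.ext (by simp; omega) (by simp)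

lemma pvIdx_length (s : Int) (z : List (Char × Char)) :
    (pvIdx s z).length = pvMism z := by
  induction z generalizing s with
  | nil => simp [pvIdx_nil, pvMism]
  | cons p z ih =>
    rw [pvIdx_cons, pvMism_cons]
    by_cases h : p.1 = p.2 <;> simp [h, ih] <;> omega

lemma pvIdx_nil_match (s : Int) (z : List (Char × Char)) (h : pvIdx s z = []) :
    ∀ i (hi : i < z.length), z[i].1 = z[i].2 := by
  induction z generalizing s with
  | nil => intro i hi; simp at hi
  | cons p z ih =>
    rw [pvIdx_cons] at h
    by_cases hp : p.1 = p.2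
    · simp [hp] at h
      intro i hi
      cases i with
      | zero => simpa using hp
      | succ k => exact ih (s + 1) h k (by simpa using hi)
    · simp [hp] at h

lemma pvIdx_singleton (z : List (Char × Char)) : ∀ (s j : Int), pvIdx s z = [j] →
    ∃ (k : Nat) (hk : k < z.length), j = s + k ∧ z[k].1 ≠ z[k].2 ∧
      ∀ i (hi : i < z.length), i ≠ k → z[i].1 = z[i].2 := by
  induction z with
  | nil => intro s j h; simp [pvIdx_nil] at h
  | cons p z ih =>
    intro s j h
    rw [pvIdx_cons] at h
    by_cases hp : p.1 = p.2
    · simp [hp] at h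
      obtain ⟨k, hk, hjk, hne, hall⟩ := ih (s + 1) j h
      refine ⟨k + 1, by simpa using Nat.succ_lt_succ hk, by push_cast; omega, by simpa using hne, ?_⟩
      intro i hi hik
      cases i with
      | zero => simpa using hp
      | succ m => exact hall m (by simpa using hi) (by omega)
    · simp [hp] at h
      obtain ⟨hjs, hrest⟩ := h
      refine ⟨0, by simp, by omega, by simpa using hp, ?_⟩
      intro i hi hik
      cases i with
      | zero => omega
      | succ m =>
        have := pvIdx_nil_match (s + 1) z hrest m (by simpa using hi)
        simpa using this

lemma pvMapf_all_match (z : List (Char × Char))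
    (h : ∀ i (hi : i < z.length), z[i].1 = z[i].2) :
    pvMapf z = z.map Prod.fst := by
  induction z with
  | nil => rfl
  | cons p z ih =>
    have h0 : p.1 = p.2 := by simpa using h 0 (by simp)
    rw [pvMapf_cons, List.map_cons, if_pos h0]
    exact congrArg _ (ih (fun i hi => by simpa using h (i + 1) (by simpa using hi)))

lemma pvMapf_build (z : List (Char × Char)) : ∀ (k : Nat) (hk : k < z.length),
    z[k].1 ≠ z[k].2 → (∀ i (hi : i < z.length), i ≠ k → z[i].1 = z[i].2) →
    pvMapf z = (z.take k).map Prod.fst ++ '-' :: (z.drop (k + 1)).map Prod.fst := by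
  induction z with
  | nil => intro k hk; simp at hk
  | cons p z ih =>
    intro k hk hne hall
    cases k with
    | zero =>
      have hp : p.1 ≠ p.2 := by simpa using hne
      rw [pvMapf_cons, if_neg hp]
      simp only [List.take_zero, List.map_nil, List.nil_append, List.drop_succ_cons,
        List.drop_zero]
      exact congrArg _ (pvMapf_all_match z (fun i hi => by
        simpa using hall (i + 1) (by simpa using hi) (by omega)))
    | succ m =>
      have hp : p.1 = p.2 := by simpa using hall 0 (by simp) (by omega)
      have hm : m < z.length := by simpa using hk
      have hne' : z[m].1 ≠ z[m].2 := by simpa using hne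
      rw [pvMapf_cons, if_pos hp, List.take_succ_cons, List.map_cons, List.drop_succ_cons]
      exact congrArg _ (ih m hm hne' (fun i hi hik => by
        simpa using hall (i + 1) (by simpa using hi) (by omega)))

theorem combine_terms_eq_alt (t1 t2 : String) :
    combine_terms t1 t2 = combine_terms_alt t1 t2 := by
  unfold combine_terms combine_terms_alt
  set z := t1.toList.zip t2.toList with hz
  rw [foldA z 0 []]
  simp only [Nat.zero_add, List.nil_append]
  have hidx : ((PySem.List.enumerate z 0).filter (fun p => p.2.1 ≠ p.2.2)).map (·.1) = pvIdx 0 z := rfl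
  rw [hidx]
  rcases hI : pvIdx 0 z with _ | ⟨j, _ | ⟨j2, rest⟩⟩
  · have : pvMism z = 0 := by rw [← pvIdx_length 0 z, hI]; rfl
    simp [this]
  · obtain ⟨k, hk, hjk, hne, hall⟩ := pvIdx_singleton z 0 j hI
    have hj : j = (k : Int) := by omega
    have hm1 : pvMism z = 1 := by rw [← pvIdx_length 0 z, hI]; rfl
    have hbuild := pvMapf_build z k hk hne hall
    have hslice1 : PySem.List.slice z none (some j) = z.take k := by
      rw [hj, PySem.List.slice_to_natCast]
    have hslice2 : PySem.List.slice z (some (j + 1)) none = z.drop (k + 1) := by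
      have : j + 1 = ((k + 1 : Nat) : Int) := by push_cast; omega
      rw [this, PySem.List.slice_from_natCast]
    simp [hm1, hbuild, hslice1, hslice2]
  · have : 2 ≤ pvMism z := by rw [← pvIdx_length 0 z, hI]; simp
    have hm : pvMism z ≠ 1 := by omega
    simp [hm]

-- ===== VERDICT (by name: the statement is the Claim_ definition above) =====
theorem combine_terms_spec : Claim_equal_combine_terms := by
  intro t1 t2 _
  unfold Spec_combine_terms
  exact combine_terms_eq_alt t1 t2
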